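-- pv_equiv track=rewrite | github.com/LppMedia/Competencia-plan | dashboard/components/data_loader.py | detect_cta
-- ===== SOURCE A (Python) =====
-- def detect_cta(url: str, bio: str) -> str:
--     """Detect primary CTA type from external URL and bio text."""
--     url_l = (url or "").lower()
--     bio_l = (bio or "").lower()
--
--     if any(x in url_l for x in ["wa.me", "wa.link", "whatsapp"]):
--         return "WhatsApp"
--     if any(x in url_l for x in ["calendly.com", "cal.com"]):
--         return "Calendly"
--     if any(x in url_l for x in ["linktr.ee", "link.bio", "linkbio", "beacons.ai", "linkin.bio"]):
--         return "Linktree"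
--     if any(x in url_l for x in ["typeform", "forms.gle", "google.com/forms"]):
--         return "Formulario"
--     if any(x in url_l for x in ["hotmart", "gumroad", "stan.store", "kajabi", "teachable", "canva.site"]):
--         return "Sales Page"
--     if any(x in url_l for x in ["hubspot", "pipedrive", "notion.site"]):
--         return "CRM / Proposal"
--     # Phone number in bio (Miami 305, Colombia 57x, Venezuela 58x, Spain 34)
--     if any(x in bio_l for x in ["305", "+1", "+57", "+58", "0414", "0412", "0416", "321", "786"]):
--         return "WhatsApp"
--     if "@" in bio_l and ".com" in bio_l:
--         return "Email"
--     return "Orgánico"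
-- ===== SOURCE B (Python) =====
-- # B: exhaustive scoring — collect (priority, label) for EVERY matching rule (no early
-- # return), then pick the winner with min(); A instead short-circuits a chain of ifs.
-- _RULES = (
--     (1, "WhatsApp", True, ("wa.me", "wa.link", "whatsapp")),
--     (2, "Calendly", True, ("calendly.com", "cal.com")),
--     (3, "Linktree", True, ("linktr.ee", "link.bio", "linkbio", "beacons.ai", "linkin.bio")),
--     (4, "Formulario", True, ("typeform", "forms.gle", "google.com/forms")),
--     (5, "Sales Page", True, ("hotmart", "gumroad", "stan.store", "kajabi", "teachable", "canva.site")),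
--     (6, "CRM / Proposal", True, ("hubspot", "pipedrive", "notion.site")),
--     (7, "WhatsApp", False, ("305", "+1", "+57", "+58", "0414", "0412", "0416", "321", "786")),
-- )
--
-- def detect_cta(url: str, bio: str) -> str:
--     url_l = (url or "").lower()
--     bio_l = (bio or "").lower()
--     hits = [(prio, label)
--             for prio, label, is_url, kws in _RULES
--             if any(k in (url_l if is_url else bio_l) for k in kws)]
--     if "@" in bio_l and ".com" in bio_l:
--         hits.append((8, "Email"))
--     hits.append((9, "Orgánico"))
--     return min(hits)[1]
-- ===== Notes on version B (the rewrite author's own statement) =====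
-- stated objective: alternative
-- what changed: Instead of a short-circuiting chain of ifs returning the first hit, B evaluates every rule, collects all matching (priority, label) candidates plus the default, and selects the result with min(); correct because the chain's answer is exactly the matching rule of smallest priority.
import Mathlib
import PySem

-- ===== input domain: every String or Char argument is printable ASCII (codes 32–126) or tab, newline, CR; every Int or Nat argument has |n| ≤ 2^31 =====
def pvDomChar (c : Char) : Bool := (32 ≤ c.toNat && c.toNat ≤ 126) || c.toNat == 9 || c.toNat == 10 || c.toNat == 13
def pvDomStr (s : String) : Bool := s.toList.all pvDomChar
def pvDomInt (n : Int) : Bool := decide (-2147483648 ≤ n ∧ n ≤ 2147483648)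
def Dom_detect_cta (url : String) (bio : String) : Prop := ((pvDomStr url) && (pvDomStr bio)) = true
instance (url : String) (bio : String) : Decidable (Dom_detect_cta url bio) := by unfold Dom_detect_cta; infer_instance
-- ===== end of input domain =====

-- B replaces A's short-circuiting if-chain by exhaustive scoring: collect every matching
-- (priority, label) candidate plus the default and pick the winner with min (objective: alternative).

-- ===== PORT A =====
def detect_cta (url : String) (bio : String) : String :=
  let url_l := PySem.Str.lower url
  let bio_l := PySem.Str.lower bio
  if ["wa.me", "wa.link", "whatsapp"].any (fun x => PySem.Str.isIn x url_l) then "WhatsApp"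
  else if ["calendly.com", "cal.com"].any (fun x => PySem.Str.isIn x url_l) then "Calendly"
  else if ["linktr.ee", "link.bio", "linkbio", "beacons.ai", "linkin.bio"].any (fun x => PySem.Str.isIn x url_l) then "Linktree"
  else if ["typeform", "forms.gle", "google.com/forms"].any (fun x => PySem.Str.isIn x url_l) then "Formulario"
  else if ["hotmart", "gumroad", "stan.store", "kajabi", "teachable", "canva.site"].any (fun x => PySem.Str.isIn x url_l) then "Sales Page"
  else if ["hubspot", "pipedrive", "notion.site"].any (fun x => PySem.Str.isIn x url_l) then "CRM / Proposal"
  else if ["305", "+1", "+57", "+58", "0414", "0412", "0416", "321", "786"].any (fun x => PySem.Str.isIn x bio_l) then "WhatsApp"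
  else if PySem.Str.isIn "@" bio_l && PySem.Str.isIn ".com" bio_l then "Email"
  else "Orgánico"

-- ===== PORT B =====
-- B's rule table: (priority, label, is_url, keywords)
def ctaRules : List (Int × String × Bool × List String) :=
  [ (1, "WhatsApp", true, ["wa.me", "wa.link", "whatsapp"]),
    (2, "Calendly", true, ["calendly.com", "cal.com"]),
    (3, "Linktree", true, ["linktr.ee", "link.bio", "linkbio", "beacons.ai", "linkin.bio"]),
    (4, "Formulario", true, ["typeform", "forms.gle", "google.com/forms"]),
    (5, "Sales Page", true, ["hotmart", "gumroad", "stan.store", "kajabi", "teachable", "canva.site"]),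
    (6, "CRM / Proposal", true, ["hubspot", "pipedrive", "notion.site"]),
    (7, "WhatsApp", false, ["305", "+1", "+57", "+58", "0414", "0412", "0416", "321", "786"]) ]

def detect_cta_alt (url : String) (bio : String) : String :=
  let url_l := PySem.Str.lower url
  let bio_l := PySem.Str.lower bio
  -- the comprehension: all matching rules, as (priority, label) candidates
  let hits :=
    (ctaRules.filter (fun r => r.2.2.2.any
        (fun k => PySem.Str.isIn k (if r.2.2.1 then url_l else bio_l)))).map
      (fun r => (r.1, r.2.1))
  let hits := hits ++ (if PySem.Str.isIn "@" bio_l && PySem.Str.isIn ".com" bio_l then [((8 : Int), "Email")] else [])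
  let hits := hits ++ [((9 : Int), "Orgánico")]
  -- Source B's min(hits): priorities in hits are pairwise distinct, so Python's lexicographic
  -- tuple min is exactly the first element of minimal first component
  match PySem.List.min? hits (fun p => p.1) with
  | some m => m.2
  | none => ""   -- unreachable: hits is nonempty

-- ===== PRECONDITION & SPEC =====
def Spec_detect_cta (url : String) (bio : String) (out : String) : Prop := out = detect_cta_alt url bio
instance (url : String) (bio : String) (out : String) : Decidable (Spec_detect_cta url bio out) := by unfold Spec_detect_cta; infer_instance

-- ===== CLAIM (what is proved, stated in full; the proofs are below) =====
def Claim_equal_detect_cta : Prop := ∀ (url : String) (bio : String), Dom_detect_cta url bio → Spec_detect_cta url bio (detect_cta url bio)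

-- ===== LEMMAS AND PROOFS =====

-- helper: push map-of-filter through one cons (used to unfold B's comprehension over the rule table)
lemma map_filter_cons {α β : Type} (p : α → Bool) (f : α → β) (r : α) (rs : List α) :
    ((r :: rs).filter p).map f = (if p r then [f r] else []) ++ (rs.filter p).map f := by
  by_cases h : p r <;> simp [h]

-- key lemma: min over the candidate segments (strictly increasing priorities) = A's first-match chain
lemma ctaMinSel (b1 b2 b3 b4 b5 b6 b7 e : Bool) :
    (if b1 then "WhatsApp" else if b2 then "Calendly" else if b3 then "Linktree"
     else if b4 then "Formulario" else if b5 then "Sales Page" else if b6 then "CRM / Proposal"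
     else if b7 then "WhatsApp" else if e then "Email" else "Orgánico") =
    (match PySem.List.min?
        ((if b1 then [((1:Int),"WhatsApp")] else []) ++ ((if b2 then [((2:Int),"Calendly")] else []) ++ ((if b3 then [((3:Int),"Linktree")] else []) ++ ((if b4 then [((4:Int),"Formulario")] else []) ++ ((if b5 then [((5:Int),"Sales Page")] else []) ++ ((if b6 then [((6:Int),"CRM / Proposal")] else []) ++ ((if b7 then [((7:Int),"WhatsApp")] else []) ++ ((if e then [((8:Int),"Email")] else []) ++ ([((9:Int),"Orgánico")]))))))))) (fun p => p.1) with
     | some m => m.2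
     | none => "") := by revert b1 b2 b3 b4 b5 b6 b7 e; decide

-- ===== VERDICT (by name: the statement is the Claim_ definition above) =====
theorem detect_cta_spec : Claim_equal_detect_cta := by
  intro url bio _
  unfold Spec_detect_cta detect_cta detect_cta_alt
  simp only [ctaRules, map_filter_cons, List.filter_nil, List.map_nil, List.append_nil,
    List.append_assoc, if_true]
  exact ctaMinSel _ _ _ _ _ _ _ _
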